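-- pv_equiv track=rewrite | github.com/ssweber/clicknick | src/clicknick/ladder/cli.py | _collapse_cols
-- ===== SOURCE A (Python) =====
-- def _collapse_cols(cols: list[str], all_col_names: tuple[str, ...]) -> str:
--     """Collapse column lists into ranges: A+C..AE or just A+C."""
--     if not cols:
--         return ""
--     # Convert to indices for contiguous-run detection
--     name_to_idx = {name: i for i, name in enumerate(all_col_names)}
--     indices = [name_to_idx[c] for c in cols]
--
--     # Group into contiguous runs
--     runs: list[list[int]] = []
--     for idx in indices:
--         if runs and idx == runs[-1][-1] + 1:
--             runs[-1].append(idx)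
--         else:
--             runs.append([idx])
--
--     parts: list[str] = []
--     for run in runs:
--         if len(run) >= 3:
--             parts.append(f"{all_col_names[run[0]]}..{all_col_names[run[-1]]}")
--         else:
--             parts.extend(all_col_names[i] for i in run)
--     return "+".join(parts)
-- ===== SOURCE B (Python) =====
-- def _collapse_cols(cols: list[str], all_col_names: tuple[str, ...]) -> str:
--     """Collapse column lists into ranges: A+C..AE or just A+C."""
--     if not cols:
--         return ""
--     name_to_idx = {name: i for i, name in enumerate(all_col_names)}
--     indices = [name_to_idx[c] for c in cols]
--     n = len(indices)
--     # Every position where a new run starts, recorded with the run's first index value.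
--     breaks = [(j, q) for j, (p, q) in enumerate(zip(indices, indices[1:]), 1) if q != p + 1]
--     parts = []
--     for (lo, start), (hi, _) in zip([(0, indices[0])] + breaks, breaks + [(n, 0)]):
--         end = start + (hi - 1 - lo)  # the run is consecutive, so its last value is arithmetic
--         if end - start >= 2:
--             parts.append(f"{all_col_names[start]}..{all_col_names[end]}")
--         else:
--             parts.extend(all_col_names[i] for i in range(start, end + 1))
--     return "+".join(parts)
-- ===== Notes on version B (the rewrite author's own statement) =====
-- stated objective: alternative
-- what changed: A accumulates a runs list-of-lists element by element and then re-iterates it to format; B never accumulates runs: it computes the set of break positions in one declarative comprehension over adjacent index pairs, pairs each break with the next via a shifted zip, and reconstructs every run arithmetically from its boundary pair (last value = start + length - 1, short runs emitted via range over values), so no run contents are ever stored or rescanned.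
import Mathlib
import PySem

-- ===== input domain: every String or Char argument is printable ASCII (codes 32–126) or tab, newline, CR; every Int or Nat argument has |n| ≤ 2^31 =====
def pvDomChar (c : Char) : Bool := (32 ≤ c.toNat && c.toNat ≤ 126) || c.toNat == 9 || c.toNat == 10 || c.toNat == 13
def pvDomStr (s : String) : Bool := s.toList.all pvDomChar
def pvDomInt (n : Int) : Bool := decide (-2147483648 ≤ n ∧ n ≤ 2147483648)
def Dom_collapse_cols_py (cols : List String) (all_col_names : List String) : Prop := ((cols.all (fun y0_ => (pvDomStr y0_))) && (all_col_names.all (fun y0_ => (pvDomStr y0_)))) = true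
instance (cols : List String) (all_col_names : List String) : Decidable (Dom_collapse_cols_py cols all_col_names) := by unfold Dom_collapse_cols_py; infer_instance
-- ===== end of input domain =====

-- B replaces A's incremental two-stage pipeline (accumulate a runs list-of-lists element by
-- element, then re-iterate it to format) by a declarative one: it computes all break positions
-- in one comprehension over adjacent index pairs, pairs each boundary with the next via a
-- shifted zip, and reconstructs each run arithmetically from its boundary pair, never storing
-- run contents (objective: alternative decomposition).

-- ===== PORT A =====
-- all_col_names[i] — every index reaching this is a dict value, i.e. in range; default never observed
def pvGetName (names : List String) (i : Int) : String :=
  (PySem.List.pyGet? names i).getD ""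

-- {name: i for i, name in enumerate(all_col_names)}
def pvNameToIdx (all_col_names : List String) : PySem.Dict String Int :=
  (PySem.List.enumerate all_col_names 0).foldl (fun d p => d.insert p.2 p.1) PySem.Dict.empty

-- body of A's first loop: extend the last run or start a new one
def pvStepRuns (runs : List (List Int)) (idx : Int) : List (List Int) :=
  match runs.getLast? with
  | some r =>
      if idx = PySem.List.pyGetD r (-1) 0 + 1 then runs.dropLast ++ [r ++ [idx]]
      else runs ++ [[idx]]
  | none => runs ++ [[idx]]

-- body of A's second loop: format one run
def pvStepParts (names : List String) (parts : List String) (run : List Int) : List String :=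
  if run.length ≥ 3 then
    parts ++ [pvGetName names (PySem.List.pyGetD run 0 0) ++ ".." ++
              pvGetName names (PySem.List.pyGetD run (-1) 0)]
  else parts ++ run.map (fun i => pvGetName names i)

def collapse_cols_py (cols : List String) (all_col_names : List String) : String :=
  if cols = [] then ""
  else
    let name_to_idx := pvNameToIdx all_col_names
    -- name_to_idx[c]: KeyError (excluded by Pre_) when c is absent; default never observed inside Pre_
    let indices : List Int := cols.map (fun c => name_to_idx.getD c 0)
    let runs : List (List Int) := indices.foldl pvStepRuns []
    let parts : List String := runs.foldl (pvStepParts all_col_names) []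
    PySem.Str.join "+" parts

-- ===== PORT B =====
-- [(j, q) for j, (p, q) in enumerate(zip(indices, indices[1:]), 1) if q != p + 1]
def pvBreaks (indices : List Int) : List (Int × Int) :=
  ((PySem.List.enumerate (indices.zip indices.tail) 1).filter
      (fun x => x.2.2 != x.2.1 + 1)).map (fun x => (x.1, x.2.2))

-- body of B's loop over the zipped boundary pairs ((lo, start), (hi, _))
def pvSegPart (names : List String) (parts : List String)
    (b : (Int × Int) × (Int × Int)) : List String :=
  let start := b.1.2
  let e := start + (b.2.1 - 1 - b.1.1)
  if e - start ≥ 2 then parts ++ [pvGetName names start ++ ".." ++ pvGetName names e]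
  else parts ++ (PySem.List.pyRange start (e + 1) 1).map (fun i => pvGetName names i)

def collapse_cols_py_alt (cols : List String) (all_col_names : List String) : String :=
  if cols = [] then ""
  else
    let name_to_idx := pvNameToIdx all_col_names
    let indices : List Int := cols.map (fun c => name_to_idx.getD c 0)
    let n : Int := indices.length
    let breaks := pvBreaks indices
    let parts := (((0, PySem.List.pyGetD indices 0 0) :: breaks).zip
        (breaks ++ [(n, 0)])).foldl (pvSegPart all_col_names) []
    PySem.Str.join "+" parts

-- ===== PRECONDITION & SPEC =====
-- Pre_ excludes exactly the inputs on which both Pythons raise KeyError: some c in cols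
-- is not a key of name_to_idx, i.e. not an element of all_col_names.
def Pre_collapse_cols_py (cols : List String) (all_col_names : List String) : Prop :=
  ∀ c ∈ cols, c ∈ all_col_names
instance (cols : List String) (all_col_names : List String) : Decidable (Pre_collapse_cols_py cols all_col_names) := by unfold Pre_collapse_cols_py; infer_instance

def pvWitness_collapse_cols_py : List String × List String :=
  (["A", "B", "C", "E"], ["A", "B", "C", "D", "E"])

def Spec_collapse_cols_py (cols : List String) (all_col_names : List String) (out : String) : Prop := out = collapse_cols_py_alt cols all_col_names
instance (cols : List String) (all_col_names : List String) (out : String) : Decidable (Spec_collapse_cols_py cols all_col_names out) := by unfold Spec_collapse_cols_py; infer_instance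

-- ===== CLAIM (what is proved, stated in full; the proofs are below) =====
def Claim_equal_collapse_cols_py : Prop := ∀ (cols : List String) (all_col_names : List String), Dom_collapse_cols_py cols all_col_names → Pre_collapse_cols_py cols all_col_names → Spec_collapse_cols_py cols all_col_names (collapse_cols_py cols all_col_names)

-- ===== LEMMAS AND PROOFS =====

-- [s, s+1, …, e] : the value of every run A builds (A's runs are consecutive blocks)
def pvSeqI (s e : Int) : List Int := (List.range (e + 1 - s).toNat).map (fun k : Nat => s + (k : Int))

-- the (start, end) pairs of the contiguous runs of s..e followed by l
def pvGroupSE (s e : Int) : List Int → List (Int × Int)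
  | [] => [(s, e)]
  | x :: xs => if x = e + 1 then pvGroupSE s x xs else (s, e) :: pvGroupSE x x xs

-- the parts either program contributes for the run (start p.1, end p.2)
def pvFmtParts (names : List String) (p : Int × Int) : List String :=
  if p.2 - p.1 ≥ 2 then [pvGetName names p.1 ++ ".." ++ pvGetName names p.2]
  else if p.2 > p.1 then [pvGetName names p.1, pvGetName names p.2]
  else [pvGetName names p.1]

-- A's second loop body, with the accumulator split off
def pvFmtA (names : List String) (run : List Int) : List String :=
  if run.length ≥ 3 then
    [pvGetName names (PySem.List.pyGetD run 0 0) ++ ".." ++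
     pvGetName names (PySem.List.pyGetD run (-1) 0)]
  else run.map (fun i => pvGetName names i)

theorem pvSeqI_self (s : Int) : pvSeqI s s = [s] := by
  simp [pvSeqI]

theorem pvSeqI_snoc (s e : Int) (h : s ≤ e + 1) : pvSeqI s (e + 1) = pvSeqI s e ++ [e + 1] := by
  have hn : (e + 1 + 1 - s).toNat = (e + 1 - s).toNat + 1 := by omega
  rw [pvSeqI, hn, List.range_succ, List.map_append, pvSeqI]
  simp only [List.map_cons, List.map_nil]
  congr 2
  omega

theorem pvSeqI_last (s e : Int) (h : s ≤ e) : PySem.List.pyGetD (pvSeqI s e) (-1) 0 = e := by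
  rcases eq_or_lt_of_le h with h' | h'
  · subst h'; rw [pvSeqI_self]
    exact PySem.List.pyGetD_neg_one_append_singleton [] s 0
  · have : pvSeqI s e = pvSeqI s (e - 1) ++ [e] := by
      have := pvSeqI_snoc s (e - 1) (by omega)
      simpa using this
    rw [this, PySem.List.pyGetD_neg_one_append_singleton]

theorem pvSeqI_cons (s e : Int) (h : s ≤ e) : pvSeqI s e = s :: pvSeqI (s + 1) e := by
  have hn : (e + 1 - s).toNat = (e + 1 - (s + 1)).toNat + 1 := by omega
  rw [pvSeqI, hn, List.range_succ_eq_map, List.map_cons, List.map_map, pvSeqI]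
  congr 1
  · simp
  · apply List.map_congr_left
    intro k _
    simp [Function.comp, Nat.succ_eq_add_one]
    omega

theorem pvSeqI_head (s e : Int) (h : s ≤ e) : PySem.List.pyGetD (pvSeqI s e) 0 0 = s := by
  rw [pvSeqI_cons s e h, PySem.List.pyGetD_zero_cons]

theorem pvSeqI_length (s e : Int) : (pvSeqI s e).length = (e + 1 - s).toNat := by
  simp [pvSeqI]

-- A's runs fold, characterised by pvGroupSE
theorem pvRunsFold (l : List Int) : ∀ (R : List (List Int)) (s e : Int), s ≤ e →
    List.foldl pvStepRuns (R ++ [pvSeqI s e]) l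
      = R ++ (pvGroupSE s e l).map (fun p => pvSeqI p.1 p.2) := by
  induction l with
  | nil => intro R s e h; simp [pvGroupSE]
  | cons x xs ih =>
    intro R s e h
    rw [List.foldl_cons]
    have hstep : pvStepRuns (R ++ [pvSeqI s e]) x =
        if x = e + 1 then R ++ [pvSeqI s (e + 1)] else (R ++ [pvSeqI s e]) ++ [[x]] := by
      rw [pvStepRuns]
      simp only [List.getLast?_concat, pvSeqI_last s e h, List.dropLast_concat]
      split_ifs with hx
      · subst hx; rw [pvSeqI_snoc s e (by omega)]
      · rfl
    by_cases hx : x = e + 1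
    · rw [hstep, if_pos hx, ih R s (e+1) (by omega), pvGroupSE, if_pos hx, hx]
    · rw [hstep, if_neg hx]
      have h2 := ih (R ++ [pvSeqI s e]) x x le_rfl
      rw [pvSeqI_self] at h2
      rw [h2, pvGroupSE, if_neg hx]
      simp

-- bounds invariant of pvGroupSE
theorem pvGroupSE_le (l : List Int) : ∀ s e : Int, s ≤ e → ∀ p ∈ pvGroupSE s e l, p.1 ≤ p.2 := by
  induction l with
  | nil => intro s e h p hp; simp [pvGroupSE] at hp; subst hp; exact h
  | cons x xs ih =>
    intro s e h p hp
    rw [pvGroupSE] at hp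
    by_cases hx : x = e + 1
    · rw [if_pos hx] at hp
      exact ih s x (by omega) p hp
    · rw [if_neg hx] at hp
      rcases List.mem_cons.mp hp with hp | hp
      · subst hp; exact h
      · exact ih x x le_rfl p hp

-- A's parts for one consecutive run
theorem pvFmtA_seqI (names : List String) (s e : Int) (h : s ≤ e) :
    (if (pvSeqI s e).length ≥ 3 then
        [pvGetName names (PySem.List.pyGetD (pvSeqI s e) 0 0) ++ ".." ++
         pvGetName names (PySem.List.pyGetD (pvSeqI s e) (-1) 0)]
      else (pvSeqI s e).map (fun i => pvGetName names i))
      = pvFmtParts names (s, e) := by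
  by_cases h2 : e - s ≥ 2
  · rw [if_pos (by rw [pvSeqI_length]; omega)]
    rw [pvSeqI_head s e h, pvSeqI_last s e h, pvFmtParts, if_pos (by simpa using h2)]
  · rw [if_neg (by rw [pvSeqI_length]; omega)]
    rcases (by omega : e = s ∨ e = s + 1) with he | he
    · subst he
      rw [pvSeqI_self, pvFmtParts]
      simp
    · subst he
      rw [pvSeqI_snoc s s (by omega), pvSeqI_self, pvFmtParts]
      norm_num


-- B's formatting of one run (start s, end e) equals pvFmtParts
theorem pvFmtB_eq (names : List String) (s e : Int) (h : s ≤ e) :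
    (if e - s ≥ 2 then [pvGetName names s ++ ".." ++ pvGetName names e]
     else (PySem.List.pyRange s (e + 1) 1).map (fun i => pvGetName names i))
      = pvFmtParts names (s, e) := by
  by_cases h2 : e - s ≥ 2
  · rw [if_pos h2, pvFmtParts, if_pos (by simpa using h2)]
  · rw [if_neg h2]
    rcases (by omega : e = s ∨ e = s + 1) with he | he
    · subst he
      rw [PySem.List.pyRange_one_singleton, pvFmtParts]
      simp
    · subst he
      rw [PySem.List.pyRange_one_cons (by omega), PySem.List.pyRange_one_singleton, pvFmtParts]
      norm_num

-- one step of B's loop, on a boundary pair of width e - s + 1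
theorem pvSegPart_eq (names : List String) (parts : List String) (lo s e junk : Int)
    (h : s ≤ e) :
    pvSegPart names parts ((lo, s), (lo + (e + 1 - s), junk))
      = parts ++ pvFmtParts names (s, e) := by
  rw [pvSegPart]
  have he : s + (lo + (e + 1 - s) - 1 - lo) = e := by ring
  simp only [he]
  rw [← pvFmtB_eq names s e h]
  split_ifs <;> rfl

-- flattening the groups of pvGroupSE recovers the original index list
theorem pvFlat_group (l : List Int) : ∀ s e : Int, s ≤ e →
    (pvGroupSE s e l).flatMap (fun p => pvSeqI p.1 p.2) = pvSeqI s e ++ l := by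
  induction l with
  | nil => intro s e h; simp [pvGroupSE]
  | cons x xs ih =>
    intro s e h
    rw [pvGroupSE]
    by_cases hx : x = e + 1
    · rw [if_pos hx, ih s x (by omega), hx, pvSeqI_snoc s e (by omega)]
      simp
    · rw [if_neg hx, List.flatMap_cons, ih x x le_rfl, pvSeqI_self]
      simp

-- the first group of pvGroupSE starts at s
theorem pvGroupSE_shape (l : List Int) : ∀ s e : Int, ∃ e' G', pvGroupSE s e l = (s, e') :: G' := by
  induction l with
  | nil => intro s e; exact ⟨e, [], rfl⟩
  | cons x xs ih =>
    intro s e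
    rw [pvGroupSE]
    by_cases hx : x = e + 1
    · rw [if_pos hx]; exact ih s x
    · rw [if_neg hx]
      exact ⟨e, pvGroupSE x x xs, rfl⟩

-- adjacent groups of pvGroupSE never continue each other
theorem pvGroupSE_chain (l : List Int) : ∀ s e : Int,
    List.IsChain (fun p q : Int × Int => q.1 ≠ p.2 + 1) (pvGroupSE s e l) := by
  induction l with
  | nil => intro s e; simp [pvGroupSE]
  | cons x xs ih =>
    intro s e
    rw [pvGroupSE]
    by_cases hx : x = e + 1
    · rw [if_pos hx]; exact ih s x
    · rw [if_neg hx]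
      obtain ⟨e', G', hG⟩ := pvGroupSE_shape xs x x
      rw [hG]
      exact List.isChain_cons_cons.mpr ⟨by simpa using hx, hG ▸ ih x x⟩

-- total width of a group list
def pvTot (G : List (Int × Int)) : Int := (G.map (fun p => p.2 + 1 - p.1)).sum

-- length of the flattened groups
theorem pvFlat_length (G : List (Int × Int)) (hG : ∀ p ∈ G, p.1 ≤ p.2) :
    ((G.flatMap (fun p => pvSeqI p.1 p.2)).length : Int) = pvTot G := by
  induction G with
  | nil => simp [pvTot]
  | cons p G ih =>
    rw [List.flatMap_cons, List.length_append, pvTot, List.map_cons, List.sum_cons]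
    have h1 : p.1 ≤ p.2 := hG p (by simp)
    have h2 := ih (fun q hq => hG q (by simp [hq]))
    rw [pvTot] at h2
    rw [pvSeqI_length]
    push_cast
    omega

-- generalised break computation (B uses start k = 1)
def pvBreaksK (k : Int) (a : List Int) : List (Int × Int) :=
  ((PySem.List.enumerate (a.zip a.tail) k).filter
      (fun x => x.2.2 != x.2.1 + 1)).map (fun x => (x.1, x.2.2))

-- expected break list: the (position, start value) of every group
def pvBrSpec (c : Int) : List (Int × Int) → List (Int × Int)
  | [] => []
  | p :: G => (c, p.1) :: pvBrSpec (c + (p.2 + 1 - p.1)) G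

-- adjacent pairs inside one consecutive run are all (t, t+1)
theorem pvSeqI_zip_consec : ∀ (n : Nat) (s e : Int), (e - s).toNat = n → s ≤ e →
    ∀ pr ∈ (pvSeqI s e).zip (pvSeqI s e).tail, pr.2 = pr.1 + 1 := by
  intro n
  induction n with
  | zero =>
    intro s e hn h pr hpr
    have : e = s := by omega
    subst this
    rw [pvSeqI_self] at hpr
    simp at hpr
  | succ n ih =>
    intro s e hn h pr hpr
    rw [pvSeqI_cons s e h, pvSeqI_cons (s+1) e (by omega)] at hpr
    simp only [List.tail_cons, List.zip_cons_cons] at hpr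
    rcases List.mem_cons.mp hpr with hpr | hpr
    · subst hpr; rfl
    · have := ih (s+1) e (by omega) (by omega) pr
      rw [pvSeqI_cons (s+1) e (by omega)] at this
      exact this (by simpa using hpr)

-- length of that pair list
theorem pvSeqI_zip_length (s e : Int) (h : s ≤ e) :
    (((pvSeqI s e).zip (pvSeqI s e).tail).length : Int) = e - s := by
  rw [List.length_zip, List.length_tail, pvSeqI_length]
  omega

-- splitting the adjacent-pair list of (run ++ rest) at the run boundary
theorem pvSeqI_zip_split : ∀ (n : Nat) (s e : Int), (e - s).toNat = n → s ≤ e →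
    ∀ (y : Int) (v : List Int),
    (pvSeqI s e ++ y :: v).zip (pvSeqI s e ++ y :: v).tail
      = (pvSeqI s e).zip (pvSeqI s e).tail ++ (e, y) :: (y :: v).zip v := by
  intro n
  induction n with
  | zero =>
    intro s e hn h y v
    have : e = s := by omega
    subst this
    rw [pvSeqI_self]
    simp
  | succ n ih =>
    intro s e hn h y v
    have h1 : s + 1 ≤ e := by omega
    rw [pvSeqI_cons s e h]
    have hc : pvSeqI (s+1) e = (s+1) :: (pvSeqI (s+1+1) e) := pvSeqI_cons (s+1) e h1
    have hIH := ih (s+1) e (by omega) h1 y v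
    rw [List.cons_append, List.tail_cons]
    calc ((s :: (pvSeqI (s+1) e ++ y :: v)).zip (pvSeqI (s+1) e ++ y :: v))
        = (s, s+1) :: ((pvSeqI (s+1) e ++ y :: v).zip (pvSeqI (s+1) e ++ y :: v).tail) := by
          rw [hc, List.cons_append, List.zip_cons_cons, List.tail_cons]
      _ = (s, s+1) :: ((pvSeqI (s+1) e).zip (pvSeqI (s+1) e).tail ++ (e, y) :: (y :: v).zip v) := by
          rw [hIH]
      _ = ((s :: pvSeqI (s+1) e).zip (pvSeqI (s+1) e)) ++ (e, y) :: (y :: v).zip v := by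
          rw [hc, List.zip_cons_cons, List.tail_cons, List.cons_append]

-- the consecutive pairs of one run all fail the break test
theorem pvFilterEnumSeq (s e k : Int) (h : s ≤ e) :
    (PySem.List.enumerate ((pvSeqI s e).zip (pvSeqI s e).tail) k).filter
        (fun x => x.2.2 != x.2.1 + 1) = [] := by
  rw [List.filter_eq_nil_iff]
  intro x hx
  have hx2 : x.2 ∈ (pvSeqI s e).zip (pvSeqI s e).tail := by
    have hm : x.2 ∈ (PySem.List.enumerate ((pvSeqI s e).zip (pvSeqI s e).tail) k).map (fun p => p.2) :=
      List.mem_map.mpr ⟨x, hx, rfl⟩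
    rwa [PySem.List.map_snd_enumerate] at hm
  have := pvSeqI_zip_consec (e - s).toNat s e rfl h x.2 hx2
  simp [this]

-- B's break comprehension, characterised by pvBrSpec over the groups
theorem pvBreaksK_eq (G : List (Int × Int)) : (∀ p ∈ G, p.1 ≤ p.2) →
    ∀ (s e k : Int), s ≤ e →
    List.IsChain (fun p q : Int × Int => q.1 ≠ p.2 + 1) ((s, e) :: G) →
    pvBreaksK k (pvSeqI s e ++ G.flatMap (fun p => pvSeqI p.1 p.2))
      = pvBrSpec (k - 1 + (e + 1 - s)) G := by
  induction G with
  | nil =>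
    intro _ s e k h _
    rw [List.flatMap_nil, List.append_nil, pvBreaksK, pvBrSpec, pvFilterEnumSeq s e k h]
    rfl
  | cons p G' ih =>
    intro hG s e k hse hchain
    have hp : p.1 ≤ p.2 := hG p (by simp)
    have hx : p.1 ≠ e + 1 := (List.isChain_cons_cons.mp hchain).1
    have hv : p.1 :: (pvSeqI (p.1 + 1) p.2 ++ G'.flatMap (fun q => pvSeqI q.1 q.2))
        = pvSeqI p.1 p.2 ++ G'.flatMap (fun q => pvSeqI q.1 q.2) := by
      rw [pvSeqI_cons p.1 p.2 hp, List.cons_append]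
    rw [List.flatMap_cons, ← hv, pvBreaksK]
    rw [pvSeqI_zip_split (e - s).toNat s e rfl hse p.1 _]
    rw [PySem.List.enumerate_append, PySem.List.enumerate_cons, List.filter_append,
      pvFilterEnumSeq s e k hse, List.nil_append]
    have hsplit : ∀ (tl : List (Int × Int × Int)),
        List.filter (fun x => x.2.2 != x.2.1 + 1)
          ((k + (((pvSeqI s e).zip (pvSeqI s e).tail).length : Int), (e, p.1)) :: tl)
        = (k + (((pvSeqI s e).zip (pvSeqI s e).tail).length : Int), (e, p.1)) ::
          List.filter (fun x => x.2.2 != x.2.1 + 1) tl := by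
      intro tl
      rw [List.filter_cons_of_pos]
      simpa using hx
    rw [hsplit, List.map_cons]
    have hlen : (((pvSeqI s e).zip (pvSeqI s e).tail).length : Int) = e - s :=
      pvSeqI_zip_length s e hse
    have htl : (p.1 :: (pvSeqI (p.1 + 1) p.2 ++ G'.flatMap (fun q => pvSeqI q.1 q.2))).tail
        = pvSeqI (p.1 + 1) p.2 ++ G'.flatMap (fun q => pvSeqI q.1 q.2) := rfl
    have hrest : ((((PySem.List.enumerate
          ((p.1 :: (pvSeqI (p.1 + 1) p.2 ++ G'.flatMap (fun q => pvSeqI q.1 q.2))).zip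
            (pvSeqI (p.1 + 1) p.2 ++ G'.flatMap (fun q => pvSeqI q.1 q.2)))
          (k + (((pvSeqI s e).zip (pvSeqI s e).tail).length : Int) + 1)).filter
          (fun x => x.2.2 != x.2.1 + 1)).map (fun x => (x.1, x.2.2))))
        = pvBrSpec (k + (((pvSeqI s e).zip (pvSeqI s e).tail).length : Int) + 1 - 1 + (p.2 + 1 - p.1)) G' := by
      have := ih (fun q hq => hG q (by simp [hq])) p.1 p.2
        (k + (((pvSeqI s e).zip (pvSeqI s e).tail).length : Int) + 1) hp
        (List.isChain_cons_cons.mp hchain).2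
      rw [pvBreaksK, ← hv] at this
      rw [← htl]
      exact this
    rw [hrest, pvBrSpec]
    rw [hlen]
    congr 2 <;> ring

-- B's boundary-pair fold, characterised over the groups
theorem pvFoldSeg (names : List String) (G : List (Int × Int)) : (∀ p ∈ G, p.1 ≤ p.2) →
    ∀ (lo s e junk : Int) (parts : List String), s ≤ e →
    List.foldl (pvSegPart names) parts
      (((lo, s) :: pvBrSpec (lo + (e + 1 - s)) G).zip
        (pvBrSpec (lo + (e + 1 - s)) G ++ [(lo + (e + 1 - s) + pvTot G, junk)]))
      = parts ++ ((s, e) :: G).flatMap (pvFmtParts names) := by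
  induction G with
  | nil =>
    intro _ lo s e junk parts h
    rw [pvBrSpec]
    have htot : pvTot [] = 0 := by simp [pvTot]
    rw [htot, add_zero, List.nil_append, List.zip_cons_cons, List.zip_nil_left,
      List.foldl_cons, List.foldl_nil, pvSegPart_eq names parts lo s e junk h]
    simp
  | cons p G' ih =>
    intro hG lo s e junk parts h
    have hp : p.1 ≤ p.2 := hG p (by simp)
    rw [pvBrSpec, List.cons_append, List.zip_cons_cons, List.foldl_cons,
      pvSegPart_eq names parts lo s e p.1 h]
    have htot : pvTot (p :: G') = (p.2 + 1 - p.1) + pvTot G' := by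
      simp [pvTot]
    have hb : lo + (e + 1 - s) + pvTot (p :: G')
        = lo + (e + 1 - s) + (p.2 + 1 - p.1) + pvTot G' := by rw [htot]; ring
    rw [hb]
    have := ih (fun q hq => hG q (by simp [hq])) (lo + (e + 1 - s)) p.1 p.2 junk
      (parts ++ pvFmtParts names (s, e)) hp
    rw [this]
    simp

-- the two ports agree on every input (membership of cols in all_col_names is not even needed:
-- both ports look names up through the same dict)
theorem pvMainEq (cols names : List String) :
    collapse_cols_py cols names = collapse_cols_py_alt cols names := by
  cases cols with
  | nil => rfl
  | cons c cs =>
    rw [collapse_cols_py, collapse_cols_py_alt]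
    simp only [if_neg (by simp : ¬(c :: cs = []))]
    set d := pvNameToIdx names with hd
    set f : String → Int := fun c => d.getD c 0 with hf
    -- A's first fold builds exactly the consecutive runs of pvGroupSE
    have hA1 : List.foldl pvStepRuns [] ((c :: cs).map f) =
        (pvGroupSE (f c) (f c) (cs.map f)).map (fun p => pvSeqI p.1 p.2) := by
      rw [List.map_cons, List.foldl_cons]
      have : pvStepRuns [] (f c) = [] ++ [pvSeqI (f c) (f c)] := by
        rw [pvStepRuns, pvSeqI_self]; rfl
      rw [this, pvRunsFold (cs.map f) [] (f c) (f c) le_rfl, List.nil_append]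
    have hstepP : pvStepParts names = fun parts run => parts ++ pvFmtA names run := by
      funext parts run
      rw [pvStepParts, pvFmtA]
      split_ifs <;> rfl
    rw [hA1, hstepP, PySem.List.foldl_append_eq_flatMap, List.nil_append, List.flatMap_map]
    have hle := pvGroupSE_le (cs.map f) (f c) (f c) le_rfl
    have hA2 : ((pvGroupSE (f c) (f c) (cs.map f)).flatMap fun p => pvFmtA names (pvSeqI p.1 p.2))
        = (pvGroupSE (f c) (f c) (cs.map f)).flatMap (pvFmtParts names) := by
      apply List.flatMap_congr
      intro p hp
      have := pvFmtA_seqI names p.1 p.2 (hle p hp)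
      rw [pvFmtA]
      exact this
    rw [hA2]
    -- B: name the groups
    obtain ⟨e0, G', hG⟩ := pvGroupSE_shape (cs.map f) (f c) (f c)
    have hle0 : f c ≤ e0 := by
      have := hle (f c, e0) (by rw [hG]; simp)
      simpa using this
    have hG'le : ∀ p ∈ G', p.1 ≤ p.2 := fun p hp => hle p (by rw [hG]; simp [hp])
    have hchain := pvGroupSE_chain (cs.map f) (f c) (f c)
    rw [hG] at hchain
    -- the flattened groups are the index list
    have hflat : pvSeqI (f c) e0 ++ G'.flatMap (fun p => pvSeqI p.1 p.2) = (c :: cs).map f := by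
      have h1 := pvFlat_group (cs.map f) (f c) (f c) le_rfl
      rw [hG, List.flatMap_cons, pvSeqI_self, List.singleton_append] at h1
      rw [h1, List.map_cons]
    -- B's breaks are pvBrSpec
    have hbr : pvBreaks ((c :: cs).map f) = pvBrSpec (0 + (e0 + 1 - f c)) G' := by
      have : pvBreaks ((c :: cs).map f)
          = pvBreaksK 1 (pvSeqI (f c) e0 ++ G'.flatMap (fun p => pvSeqI p.1 p.2)) := by
        rw [hflat]; rfl
      rw [this, pvBreaksK_eq G' hG'le (f c) e0 1 hle0 hchain]
      norm_num
    -- the list length is the total width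
    have hn : ((((c :: cs).map f).length : Nat) : Int) = 0 + (e0 + 1 - f c) + pvTot G' := by
      rw [← hflat, List.length_append, pvSeqI_length]
      have h2 := pvFlat_length G' hG'le
      push_cast
      omega
    -- the first index is f c
    have h0 : PySem.List.pyGetD ((c :: cs).map f) 0 0 = f c := by
      rw [List.map_cons, PySem.List.pyGetD_zero_cons]
    rw [hbr, hn, h0]
    rw [pvFoldSeg names G' hG'le 0 (f c) e0 0 [] hle0, List.nil_append, ← hG]

-- ===== VERDICT (by name: the statement is the Claim_ definition above) =====
theorem collapse_cols_py_spec : Claim_equal_collapse_cols_py := by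
  intro cols all_col_names _ _
  unfold Spec_collapse_cols_py
  exact pvMainEq cols all_col_names
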